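-- pv_equiv track=rewrite | github.com/yufang2802/CS1010E | winners.py | winners
-- ===== SOURCE A (Python) =====
-- def winners(factor, musthave, participants):
-- 	count = 0
-- 	for i in range(1,participants+1):
-- 		if i%factor == 0 and i%10 == musthave:
-- 			count += 1
-- 		elif i%factor == 0 and (i//10)%10 == musthave:
-- 			count += 1
-- 		elif i%factor == 0 and (i//100)%10 == musthave:
-- 			count += 1
-- 	return count
-- ===== SOURCE B (Python) =====
-- def winners(factor, musthave, participants):
--     # Periodic counting: the test depends only on i modulo lcm(|factor|, 1000),
--     # so count one period and multiply, then add the tail.  O(1000) vs A's O(participants).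
--     f = -factor if factor < 0 else factor
--     a, b = f, 1000
--     while b > 0:
--         a, b = b, a % b
--     period = f * 1000 // a          # lcm(f, 1000)
--
--     def hits(limit):
--         c = 0
--         for m in range(f, limit + 1, f):
--             d = m % 1000
--             if d % 10 == musthave or d // 10 % 10 == musthave or d // 100 == musthave:
--                 c += 1
--         return c
--
--     if participants <= 0:
--         return 0
--     q, r = divmod(participants, period)
--     return q * hits(period) + hits(r)
-- ===== Notes on version B (the rewrite author's own statement) =====
-- stated objective: faster
-- what changed: Instead of scanning every i in 1..participants, B observes the test depends only on i mod lcm(|factor|,1000), counts matching multiples in a single period and multiplies by the number of full periods plus a tail count. Pre_ excludes factor = 0, where the loop's i%factor raises ZeroDivisionError whenever participants >= 1 (with participants <= 0 the loop body never runs and both return 0).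
-- outside the precondition, e.g. on winners(0, 5, -3): A returns 0, B returns 0
import Mathlib
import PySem

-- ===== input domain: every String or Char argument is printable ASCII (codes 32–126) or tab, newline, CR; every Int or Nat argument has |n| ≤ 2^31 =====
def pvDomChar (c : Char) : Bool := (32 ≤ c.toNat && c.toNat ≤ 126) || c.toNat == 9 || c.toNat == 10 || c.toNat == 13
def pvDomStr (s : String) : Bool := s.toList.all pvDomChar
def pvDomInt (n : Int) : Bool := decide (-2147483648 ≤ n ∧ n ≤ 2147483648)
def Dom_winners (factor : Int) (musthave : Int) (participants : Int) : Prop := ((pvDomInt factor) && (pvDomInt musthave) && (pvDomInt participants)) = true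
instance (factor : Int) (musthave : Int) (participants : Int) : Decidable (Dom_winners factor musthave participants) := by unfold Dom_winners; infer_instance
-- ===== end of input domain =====

-- ===== PORT A =====
-- Port of A: linear scan i = 1..participants, elif chain testing the three low digits.
def winners (factor : Int) (musthave : Int) (participants : Int) : Int :=
  (PySem.List.pyRange 1 (participants + 1) 1).foldl
    (fun count i =>
      if PySem.Int.mod i factor == 0 && PySem.Int.mod i 10 == musthave then count + 1
      else if PySem.Int.mod i factor == 0 &&
          PySem.Int.mod (PySem.Int.floordiv i 10) 10 == musthave then count + 1
      else if PySem.Int.mod i factor == 0 &&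
          PySem.Int.mod (PySem.Int.floordiv i 100) 10 == musthave then count + 1
      else count) 0

-- ===== PORT B =====
-- B (periodic counting): the test depends only on i mod lcm(|factor|, 1000); count one
-- period of multiples, multiply by the number of full periods, add the tail.

-- Python: `while b > 0: a, b = b, a % b`  (Euclid's gcd loop from Source B)
def pvEuclid (a b : Int) : Int :=
  if h : 0 < b then pvEuclid b (PySem.Int.mod a b) else a
termination_by b.toNat
decreasing_by
  have h1 := PySem.Int.mod_lt a h
  have h2 := PySem.Int.mod_nonneg a h
  omega

-- Python: helper `hits(limit)` from Source B — count matches among multiples of f in [1, limit]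
def pvHits (f : Int) (musthave : Int) (limit : Int) : Int :=
  (PySem.List.pyRange f (limit + 1) f).foldl
    (fun c m =>
      let d := PySem.Int.mod m 1000
      if PySem.Int.mod d 10 == musthave ||
          PySem.Int.mod (PySem.Int.floordiv d 10) 10 == musthave ||
          PySem.Int.floordiv d 100 == musthave then c + 1
      else c) 0

def winners_alt (factor : Int) (musthave : Int) (participants : Int) : Int :=
  let f := if factor < 0 then -factor else factor
  let g := pvEuclid f 1000
  let period := PySem.Int.floordiv (f * 1000) g
  if participants ≤ 0 then 0
  else
    let q := PySem.Int.floordiv participants period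
    let r := PySem.Int.mod participants period
    q * pvHits f musthave period + pvHits f musthave r

-- ===== PRECONDITION & SPEC =====
-- Pre_ excludes factor = 0: there A's i%factor raises ZeroDivisionError whenever participants >= 1
-- (and B's divmod/step raises too); when participants <= 0 the loop never runs and both return 0.
def Pre_winners (factor : Int) (musthave : Int) (participants : Int) : Prop := factor ≠ 0
instance (factor : Int) (musthave : Int) (participants : Int) :
    Decidable (Pre_winners factor musthave participants) := by unfold Pre_winners; infer_instance
def pvWitness_winners : Int × Int × Int := (3, 7, 100)

def Spec_winners (factor : Int) (musthave : Int) (participants : Int) (out : Int) : Prop := out = winners_alt factor musthave participants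
instance (factor : Int) (musthave : Int) (participants : Int) (out : Int) : Decidable (Spec_winners factor musthave participants out) := by unfold Spec_winners; infer_instance

-- ===== CLAIM (what is proved, stated in full; the proofs are below) =====
def Claim_equal_winners : Prop := ∀ (factor : Int) (musthave : Int) (participants : Int), Dom_winners factor musthave participants → Pre_winners factor musthave participants → Spec_winners factor musthave participants (winners factor musthave participants)

-- ===== LEMMAS AND PROOFS =====

-- A's per-element test, as one predicate
def pvDigit (mh i : Int) : Bool :=
  (PySem.Int.mod i 10 == mh) || (PySem.Int.mod (PySem.Int.floordiv i 10) 10 == mh) ||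
    (PySem.Int.mod (PySem.Int.floordiv i 100) 10 == mh)

def pvP (f mh i : Int) : Bool := (PySem.Int.mod i f == 0) && pvDigit mh i

-- B's per-multiple test
def pvC (mh m : Int) : Bool :=
  (PySem.Int.mod (PySem.Int.mod m 1000) 10 == mh) ||
    (PySem.Int.mod (PySem.Int.floordiv (PySem.Int.mod m 1000) 10) 10 == mh) ||
    (PySem.Int.floordiv (PySem.Int.mod m 1000) 100 == mh)

theorem winners_eq_countP (f mh n : Int) :
    winners f mh n = ((PySem.List.pyRange 1 (n + 1) 1).countP (pvP f mh) : Int) := by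
  unfold winners
  have hfun : (fun (count i : Int) =>
      if PySem.Int.mod i f == 0 && PySem.Int.mod i 10 == mh then count + 1
      else if PySem.Int.mod i f == 0 &&
          PySem.Int.mod (PySem.Int.floordiv i 10) 10 == mh then count + 1
      else if PySem.Int.mod i f == 0 &&
          PySem.Int.mod (PySem.Int.floordiv i 100) 10 == mh then count + 1
      else count)
      = (fun (count i : Int) => if pvP f mh i then count + 1 else count) := by
    funext count i
    unfold pvP pvDigit
    cases PySem.Int.mod i f == 0 <;>
      cases PySem.Int.mod i 10 == mh <;>
      cases PySem.Int.mod (PySem.Int.floordiv i 10) 10 == mh <;>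
      cases PySem.Int.mod (PySem.Int.floordiv i 100) 10 == mh <;> simp
  rw [hfun, PySem.List.foldl_count_if, zero_add]

theorem pvHits_eq_countP (f mh L : Int) :
    pvHits f mh L = ((PySem.List.pyRange f (L + 1) f).countP (pvC mh) : Int) := by
  unfold pvHits
  rw [show (fun (c m : Int) =>
      let d := PySem.Int.mod m 1000
      if PySem.Int.mod d 10 == mh ||
          PySem.Int.mod (PySem.Int.floordiv d 10) 10 == mh ||
          PySem.Int.floordiv d 100 == mh then c + 1
      else c) = (fun (c m : Int) => if pvC mh m then c + 1 else c) from rfl]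
  rw [PySem.List.foldl_count_if, zero_add]

-- B's test equals A's digit test (all the divisors are positive literals, so omega settles it)
theorem pvC_eq_pvDigit (mh m : Int) : pvC mh m = pvDigit mh m := by
  unfold pvC pvDigit
  rw [show PySem.Int.mod m 1000 = m % 1000 from PySem.Int.mod_eq_emod_of_pos (by norm_num)]
  rw [show PySem.Int.mod m 10 = m % 10 from PySem.Int.mod_eq_emod_of_pos (by norm_num)]
  rw [show PySem.Int.mod (m % 1000) 10 = (m % 1000) % 10 from
    PySem.Int.mod_eq_emod_of_pos (by norm_num)]
  rw [show PySem.Int.floordiv m 10 = m / 10 from PySem.Int.floordiv_eq_ediv_of_pos (by norm_num)]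
  rw [show PySem.Int.floordiv (m % 1000) 10 = (m % 1000) / 10 from
    PySem.Int.floordiv_eq_ediv_of_pos (by norm_num)]
  rw [show PySem.Int.floordiv m 100 = m / 100 from PySem.Int.floordiv_eq_ediv_of_pos (by norm_num)]
  rw [show PySem.Int.floordiv (m % 1000) 100 = (m % 1000) / 100 from
    PySem.Int.floordiv_eq_ediv_of_pos (by norm_num)]
  rw [show PySem.Int.mod (m / 10) 10 = (m / 10) % 10 from PySem.Int.mod_eq_emod_of_pos (by norm_num)]
  rw [show PySem.Int.mod ((m % 1000) / 10) 10 = ((m % 1000) / 10) % 10 from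
    PySem.Int.mod_eq_emod_of_pos (by norm_num)]
  rw [show PySem.Int.mod (m / 100) 10 = (m / 100) % 10 from PySem.Int.mod_eq_emod_of_pos (by norm_num)]
  rw [show (m % 1000) % 10 = m % 10 by omega]
  rw [show (m % 1000) / 10 % 10 = m / 10 % 10 by omega]
  rw [show (m % 1000) / 100 = m / 100 % 10 by omega]

theorem pvP_divides (f mh i : Int) : pvP f mh i = (decide (f ∣ i) && pvDigit mh i) := by
  unfold pvP
  by_cases h : f ∣ i
  · rw [decide_eq_true h, show PySem.Int.mod i f = 0 from (PySem.Int.mod_eq_zero_iff_dvd i f).mpr h]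
    rfl
  · rw [decide_eq_false h]
    have : ¬ PySem.Int.mod i f = 0 := fun hc => h ((PySem.Int.mod_eq_zero_iff_dvd i f).mp hc)
    simp [beq_iff_eq, this]

-- the multiples of f in [1, b) are exactly range(f, b, f)
theorem filter_dvd_pyRange (f b : Int) (hf : 0 < f) :
    (PySem.List.pyRange 1 b 1).filter (fun i => decide (f ∣ i)) = PySem.List.pyRange f b f := by
  have hnd1 : ((PySem.List.pyRange 1 b 1).filter (fun i => decide (f ∣ i))).Pairwise (· < ·) :=
    (PySem.List.pairwise_lt_pyRange_one 1 b).filter _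
  have hnd2 : (PySem.List.pyRange f b f).Pairwise (· < ·) := by
    rw [PySem.List.pyRange_of_pos f b hf, List.pairwise_map]
    refine List.Pairwise.imp ?_ List.pairwise_lt_range
    intro x y hxy
    have hxy' : (x : Int) < y := by exact_mod_cast hxy
    nlinarith
  have hmem : ∀ x, x ∈ (PySem.List.pyRange 1 b 1).filter (fun i => decide (f ∣ i)) ↔
      x ∈ PySem.List.pyRange f b f := by
    intro x
    rw [List.mem_filter, PySem.List.mem_pyRange_one, PySem.List.mem_pyRange_iff_of_pos hf]
    constructor
    · rintro ⟨⟨h1, h2⟩, h3⟩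
      have hd := of_decide_eq_true h3
      exact ⟨Int.le_of_dvd (by omega) hd, h2, dvd_sub hd (dvd_refl f)⟩
    · rintro ⟨h1, h2, h3⟩
      have hd : f ∣ x := by simpa using dvd_add h3 (dvd_refl f)
      exact ⟨⟨by omega, h2⟩, decide_eq_true hd⟩
  exact List.Perm.eq_of_pairwise (fun a b _ _ hab hba => by omega) hnd1 hnd2
    ((List.perm_ext_iff_of_nodup hnd1.nodup hnd2.nodup).mpr hmem)

-- count over all of [1, b] with the divisibility test = count over the multiples alone
theorem countP_multiples (f mh b : Int) (hf : 0 < f) :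
    (PySem.List.pyRange 1 (b + 1) 1).countP (pvP f mh)
      = (PySem.List.pyRange f (b + 1) f).countP (pvDigit mh) := by
  rw [← filter_dvd_pyRange f (b + 1) hf, List.countP_filter]
  apply List.countP_congr
  intro i _
  rw [pvP_divides, Bool.and_comm]

theorem pvP_shift (f mh L i : Int) (hfL : f ∣ L) (h1000 : (1000 : Int) ∣ L) :
    pvP f mh (i + L) = pvP f mh i := by
  obtain ⟨k, hk⟩ := h1000
  have hdig : pvDigit mh (i + L) = pvDigit mh i := by
    subst hk
    unfold pvDigit
    rw [show PySem.Int.mod (i + 1000 * k) 10 = (i + 1000 * k) % 10 from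
      PySem.Int.mod_eq_emod_of_pos (by norm_num)]
    rw [show PySem.Int.mod i 10 = i % 10 from PySem.Int.mod_eq_emod_of_pos (by norm_num)]
    rw [show PySem.Int.floordiv (i + 1000 * k) 10 = (i + 1000 * k) / 10 from
      PySem.Int.floordiv_eq_ediv_of_pos (by norm_num)]
    rw [show PySem.Int.floordiv i 10 = i / 10 from PySem.Int.floordiv_eq_ediv_of_pos (by norm_num)]
    rw [show PySem.Int.floordiv (i + 1000 * k) 100 = (i + 1000 * k) / 100 from
      PySem.Int.floordiv_eq_ediv_of_pos (by norm_num)]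
    rw [show PySem.Int.floordiv i 100 = i / 100 from PySem.Int.floordiv_eq_ediv_of_pos (by norm_num)]
    rw [show PySem.Int.mod ((i + 1000 * k) / 10) 10 = ((i + 1000 * k) / 10) % 10 from
      PySem.Int.mod_eq_emod_of_pos (by norm_num)]
    rw [show PySem.Int.mod (i / 10) 10 = (i / 10) % 10 from PySem.Int.mod_eq_emod_of_pos (by norm_num)]
    rw [show PySem.Int.mod ((i + 1000 * k) / 100) 10 = ((i + 1000 * k) / 100) % 10 from
      PySem.Int.mod_eq_emod_of_pos (by norm_num)]
    rw [show PySem.Int.mod (i / 100) 10 = (i / 100) % 10 from PySem.Int.mod_eq_emod_of_pos (by norm_num)]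
    rw [show (i + 1000 * k) % 10 = i % 10 by omega]
    rw [show (i + 1000 * k) / 10 % 10 = i / 10 % 10 by omega]
    rw [show (i + 1000 * k) / 100 % 10 = i / 100 % 10 by omega]
  have hdvd : (f ∣ i + L) ↔ (f ∣ i) := by
    constructor
    · intro h; have := dvd_sub h hfL; simpa using this
    · intro h; exact dvd_add h hfL
  unfold pvP
  rw [hdig]
  by_cases h : f ∣ i
  · rw [show PySem.Int.mod i f = 0 from (PySem.Int.mod_eq_zero_iff_dvd i f).mpr h,
      show PySem.Int.mod (i + L) f = 0 from (PySem.Int.mod_eq_zero_iff_dvd _ f).mpr (hdvd.mpr h)]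
  · have h1 : ¬ PySem.Int.mod i f = 0 := fun hc => h ((PySem.Int.mod_eq_zero_iff_dvd i f).mp hc)
    have h2 : ¬ PySem.Int.mod (i + L) f = 0 := fun hc =>
      h (hdvd.mp ((PySem.Int.mod_eq_zero_iff_dvd _ f).mp hc))
    rw [show (PySem.Int.mod (i + L) f == 0) = false from beq_eq_false_iff_ne.mpr h2,
      show (PySem.Int.mod i f == 0) = false from beq_eq_false_iff_ne.mpr h1]

-- counting is shift-invariant for a periodic predicate
theorem countP_shift (f mh L c : Int) (hfL : f ∣ L) (h1000 : (1000 : Int) ∣ L) :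
    (PySem.List.pyRange (1 + L) (c + L) 1).countP (pvP f mh)
      = (PySem.List.pyRange 1 c 1).countP (pvP f mh) := by
  rw [PySem.List.pyRange_one (1 + L) (c + L), PySem.List.pyRange_one 1 c,
    List.countP_map, List.countP_map]
  rw [show c + L - (1 + L) = c - 1 by ring]
  apply List.countP_congr
  intro k _
  simp only [Function.comp]
  rw [show (1 : Int) + L + (k : Int) = 1 + (k : Int) + L by ring, pvP_shift f mh L _ hfL h1000]

theorem countP_blocks (f mh L : Int) (hfL : f ∣ L) (h1000 : (1000 : Int) ∣ L) (hL : 1 ≤ L)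
    (q : Nat) : ∀ r : Int, 0 ≤ r →
    ((PySem.List.pyRange 1 ((q : Int) * L + r + 1) 1).countP (pvP f mh) : Int)
      = (q : Int) * ((PySem.List.pyRange 1 (L + 1) 1).countP (pvP f mh) : Int)
        + ((PySem.List.pyRange 1 (r + 1) 1).countP (pvP f mh) : Int) := by
  induction q with
  | zero => intro r hr; push_cast; simp
  | succ q ih =>
    intro r hr
    push_cast
    have hq0 : (0 : Int) ≤ (q : Int) := Int.natCast_nonneg q
    have hsplit := PySem.List.pyRange_one_append 1 (L + 1) (((q : Int) + 1) * L + r + 1)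
      (by omega) (by nlinarith)
    rw [hsplit, List.countP_append]
    have hshift : PySem.List.pyRange (L + 1) (((q : Int) + 1) * L + r + 1) 1
        = PySem.List.pyRange (1 + L) (((q : Int) * L + r + 1) + L) 1 := by
      congr 1 <;> ring
    rw [hshift, countP_shift f mh L _ hfL h1000]
    have hih := ih r hr
    push_cast at hih ⊢
    rw [hih]
    ring

-- |factor| divides the same numbers as factor
theorem pvP_abs (f mh i : Int) :
    pvP f mh i = pvP (if f < 0 then -f else f) mh i := by
  unfold pvP
  by_cases hneg : f < 0
  · simp only [if_pos hneg]
    by_cases h : f ∣ i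
    · rw [show PySem.Int.mod i f = 0 from (PySem.Int.mod_eq_zero_iff_dvd i f).mpr h,
        show PySem.Int.mod i (-f) = 0 from (PySem.Int.mod_eq_zero_iff_dvd i (-f)).mpr
          ((neg_dvd).mpr h)]
    · have h1 : ¬ PySem.Int.mod i f = 0 := fun hc => h ((PySem.Int.mod_eq_zero_iff_dvd i f).mp hc)
      have h2 : ¬ PySem.Int.mod i (-f) = 0 := fun hc =>
        h ((neg_dvd).mp ((PySem.Int.mod_eq_zero_iff_dvd i (-f)).mp hc))
      rw [show (PySem.Int.mod i f == 0) = false from beq_eq_false_iff_ne.mpr h1,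
        show (PySem.Int.mod i (-f) == 0) = false from beq_eq_false_iff_ne.mpr h2]
  · simp [if_neg hneg]

theorem pvEuclid_gcd : ∀ (n : Nat) (a b : Int), 0 ≤ a → 0 ≤ b → b.toNat ≤ n →
    pvEuclid a b = (Int.gcd a b : Int) := by
  intro n
  induction n with
  | zero =>
    intro a b ha hb hle
    have hb0 : b = 0 := by omega
    subst hb0
    unfold pvEuclid
    rw [dif_neg (by omega)]
    simp [Int.gcd, Int.natAbs_of_nonneg ha]
  | succ n ih =>
    intro a b ha hb hle
    by_cases h : 0 < b
    · unfold pvEuclid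
      rw [dif_pos h]
      have hmod : PySem.Int.mod a b = a % b := PySem.Int.mod_eq_emod_of_pos h
      have hmn : 0 ≤ a % b := Int.emod_nonneg a (by omega)
      have hml : a % b < b := Int.emod_lt_of_pos a h
      rw [hmod, ih b (a % b) (by omega) hmn (by omega)]
      congr 1
      unfold Int.gcd
      rw [Int.natAbs_emod_of_nonneg ha b, Nat.gcd_comm, ← Nat.gcd_rec, Nat.gcd_comm]
    · have hb0 : b = 0 := by omega
      subst hb0
      unfold pvEuclid
      rw [dif_neg (by omega)]
      simp [Int.gcd, Int.natAbs_of_nonneg ha]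

-- ===== VERDICT (by name: the statement is the Claim_ definition above) =====
theorem winners_spec : Claim_equal_winners := by
  intro factor mh n _ hpre
  have hf0 : factor ≠ 0 := hpre
  unfold Spec_winners
  rw [winners_eq_countP]
  set F : Int := if factor < 0 then -factor else factor with hF
  have hFpos : 0 < F := by
    rw [hF]; by_cases h : factor < 0 <;> simp [h] <;> omega
  have hg : pvEuclid F 1000 = (Int.gcd F 1000 : Int) :=
    pvEuclid_gcd 1000 F 1000 (le_of_lt hFpos) (by norm_num) (by decide)
  have hgpos : (0 : Int) < (Int.gcd F 1000 : Int) := by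
    have : 0 < F.gcd 1000 := Nat.pos_of_ne_zero (by simp [Int.gcd])
    exact_mod_cast this
  have hgF : (Int.gcd F 1000 : Int) ∣ F := Int.gcd_dvd_left F 1000
  have hg1000 : (Int.gcd F 1000 : Int) ∣ (1000 : Int) := Int.gcd_dvd_right F 1000
  set L : Int := PySem.Int.floordiv (F * 1000) (pvEuclid F 1000) with hLdef
  have hLval : L = F * 1000 / (Int.gcd F 1000 : Int) := by
    rw [hLdef, hg, PySem.Int.floordiv_eq_ediv_of_pos hgpos]
  have hFL : F ∣ L := by
    rw [hLval, Int.mul_ediv_assoc F hg1000]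
    exact Dvd.intro _ rfl
  have h1000L : (1000 : Int) ∣ L := by
    rw [hLval, mul_comm F 1000, Int.mul_ediv_assoc 1000 hgF]
    exact Dvd.intro _ rfl
  have hLpos : 0 < L := by
    rw [hLval]
    exact Int.ediv_pos_of_pos_of_dvd (by positivity) (by omega) (Dvd.dvd.mul_left hg1000 F)
  have hA : (PySem.List.pyRange 1 (n + 1) 1).countP (pvP factor mh)
      = (PySem.List.pyRange 1 (n + 1) 1).countP (pvP F mh) := by
    apply List.countP_congr
    intro i _
    rw [pvP_abs factor mh i, hF]
  rw [hA]
  have hbridge : ∀ b : Int, pvHits F mh b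
      = ((PySem.List.pyRange 1 (b + 1) 1).countP (pvP F mh) : Int) := by
    intro b
    rw [pvHits_eq_countP, countP_multiples F mh b hFpos]
    congr 1
    apply List.countP_congr
    intro m _
    rw [pvC_eq_pvDigit mh m]
  simp only [winners_alt]
  rw [← hF, ← hLdef]
  by_cases hn : n ≤ 0
  · rw [if_pos hn, PySem.List.pyRange_one_eq_nil (by omega)]
    simp
  · rw [if_neg hn]
    rw [PySem.Int.floordiv_eq_ediv_of_pos hLpos, PySem.Int.mod_eq_emod_of_pos hLpos]
    rw [hbridge L, hbridge (n % L)]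
    have hq0 : 0 ≤ n / L := Int.ediv_nonneg (by omega) (by omega)
    have hr0 : 0 ≤ n % L := Int.emod_nonneg n (by omega)
    have hcount := countP_blocks F mh L hFL h1000L (by omega) (n / L).toNat (n % L) hr0
    rw [Int.toNat_of_nonneg hq0] at hcount
    have hsum : n + 1 = (n / L) * L + (n % L) + 1 := by
      have h := Int.ediv_add_emod n L
      linarith
    rw [hsum, hcount]

-- ===== (end) =====
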